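-- pv_equiv track=rewrite | github.com/osm-quality/OSM-wikipedia-tag-validator | generate_webpage_with_error_output.py | desired_wikipedia_target
-- ===== SOURCE A (Python) =====
-- def desired_wikipedia_target(e):
--     desired = None
--     if e['proposed_tagging_changes'] != None:
--         for change in e['proposed_tagging_changes']:
--             if "wikipedia" in change["to"]:
--                 if desired != None:
--                     raise ValueError("multiple incoming replacements of the same tag")
--                 desired = change["to"]["wikipedia"]
--     return desired
-- ===== SOURCE B (Python) =====
-- def _single_target(changes):
--     # recursion with a merge step: combine the head's optional target
--     # with the single target of the rest; two non-None halves is an error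
--     if not changes:
--         return None
--     head = changes[0]['to'].get('wikipedia')
--     tail = _single_target(changes[1:])
--     if head is not None and tail is not None:
--         raise ValueError("multiple incoming replacements of the same tag")
--     return head if head is not None else tail
--
-- def desired_wikipedia_target(e):
--     changes = e['proposed_tagging_changes']
--     if changes is None:
--         changes = []
--     return _single_target(changes)
-- ===== Notes on version B (the rewrite author's own statement) =====
-- stated objective: alternative
-- what changed: B replaces A's stateful scan (a 'desired' accumulator mutated inside a for-loop, raising mid-scan) by a structural recursion with a merge step: the head's optional target is combined with the recursively computed target of the tail, raising only when both halves are non-None.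
import Mathlib
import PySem

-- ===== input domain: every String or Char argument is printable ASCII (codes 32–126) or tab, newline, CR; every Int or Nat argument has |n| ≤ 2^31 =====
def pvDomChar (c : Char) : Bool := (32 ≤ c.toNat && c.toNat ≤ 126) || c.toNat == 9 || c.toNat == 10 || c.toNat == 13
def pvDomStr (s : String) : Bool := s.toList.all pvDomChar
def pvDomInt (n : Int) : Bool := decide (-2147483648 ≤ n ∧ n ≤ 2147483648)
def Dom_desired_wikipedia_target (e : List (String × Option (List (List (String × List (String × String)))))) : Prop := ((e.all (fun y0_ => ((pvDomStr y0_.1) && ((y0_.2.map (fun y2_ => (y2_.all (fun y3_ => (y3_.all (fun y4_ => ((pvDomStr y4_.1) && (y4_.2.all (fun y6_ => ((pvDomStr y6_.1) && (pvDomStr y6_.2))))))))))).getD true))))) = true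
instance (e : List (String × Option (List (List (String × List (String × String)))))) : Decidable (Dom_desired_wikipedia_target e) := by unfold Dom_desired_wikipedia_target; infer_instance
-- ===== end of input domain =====

-- B replaces A's stateful scan by a structural recursion with a merge step (head target
-- combined with the tail's recursive result); equivalence on inputs where A returns.


-- ===== PORT A =====
-- change["to"]["wikipedia"] when "wikipedia" in change["to"], else none
-- (missing "to" is excluded by Pre_, so getD [] is exact there)
def pvGetWiki (c : List (String × List (String × String))) : Option String :=
  PySem.Dict.get? (PySem.Dict.mk ((PySem.Dict.mk c).getD "to" [])) "wikipedia"

-- the for-loop of A; .error () models the ValueError raise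
def pvLoopA (lst : List (List (String × List (String × String)))) (d : Option String) :
    Except Unit (Option String) :=
  match lst with
  | [] => .ok d
  | c :: rest =>
    match pvGetWiki c with
    | some w => if d.isSome then .error () else pvLoopA rest (some w)
    | none => pvLoopA rest d

def desired_wikipedia_target (e : List (String × Option (List (List (String × List (String × String)))))) : Option String :=
  match PySem.Dict.get? (PySem.Dict.mk e) "proposed_tagging_changes" with
  | some (some lst) =>
    match pvLoopA lst none with
    | .ok d => d
    | .error _ => none   -- unreachable under Pre_ (ValueError)
  | _ => none            -- field is None, or KeyError (excluded by Pre_)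

-- ===== PORT B =====
-- _single_target: structural recursion; head = changes[0]['to'].get('wikipedia'),
-- tail = recursion on the rest, merged; both non-None = ValueError (unreachable under Pre_)
def pvSingleTarget (lst : List (List (String × List (String × String)))) : Option String :=
  match lst with
  | [] => none
  | c :: rest =>
    let head := PySem.Dict.get? (PySem.Dict.mk ((PySem.Dict.mk c).getD "to" [])) "wikipedia"
    let tail := pvSingleTarget rest
    if head.isSome && tail.isSome then none   -- ValueError, unreachable under Pre_
    else if head.isSome then head else tail

def desired_wikipedia_target_alt (e : List (String × Option (List (List (String × List (String × String)))))) : Option String :=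
  -- changes = e['proposed_tagging_changes'] (KeyError excluded by Pre_); None ↦ []
  match PySem.Dict.get? (PySem.Dict.mk e) "proposed_tagging_changes" with
  | some (some lst) => pvSingleTarget lst
  | some none => pvSingleTarget []
  | none => none   -- KeyError (excluded by Pre_)

-- ===== PRECONDITION & SPEC =====
-- Pre_ excludes exactly the inputs where A raises: a missing 'proposed_tagging_changes'
-- key (KeyError), a change without a 'to' key (KeyError), and more than one change
-- carrying a 'wikipedia' replacement (ValueError).
def Pre_desired_wikipedia_target (e : List (String × Option (List (List (String × List (String × String)))))) : Prop :=
  (PySem.Dict.get? (PySem.Dict.mk e) "proposed_tagging_changes").isSome = true ∧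
  (let lst := ((PySem.Dict.get? (PySem.Dict.mk e) "proposed_tagging_changes").getD none).getD []
   (∀ c ∈ lst, ((PySem.Dict.mk c).get? "to").isSome = true) ∧
   lst.countP (fun c => ((PySem.Dict.mk ((PySem.Dict.mk c).getD "to" [])).contains "wikipedia")) ≤ 1)
instance (e : List (String × Option (List (List (String × List (String × String)))))) : Decidable (Pre_desired_wikipedia_target e) := by unfold Pre_desired_wikipedia_target; infer_instance

def pvWitness_desired_wikipedia_target : (List (String × Option (List (List (String × List (String × String)))))) :=
  [("proposed_tagging_changes", some [[("to", [("wikipedia", "en:Foo")])], [("to", [("amenity", "bench")])]])]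

def Spec_desired_wikipedia_target (e : List (String × Option (List (List (String × List (String × String)))))) (out : Option String) : Prop := out = desired_wikipedia_target_alt e
instance (e : List (String × Option (List (List (String × List (String × String)))))) (out : Option String) : Decidable (Spec_desired_wikipedia_target e out) := by unfold Spec_desired_wikipedia_target; infer_instance

-- ===== CLAIM (what is proved, stated in full; the proofs are below) =====
def Claim_equal_desired_wikipedia_target : Prop := ∀ (e : List (String × Option (List (List (String × List (String × String)))))), Dom_desired_wikipedia_target e → Pre_desired_wikipedia_target e → Spec_desired_wikipedia_target e (desired_wikipedia_target e)

-- ===== LEMMAS AND PROOFS =====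
lemma pvContains_eq (c : List (String × List (String × String))) :
    ((PySem.Dict.mk ((PySem.Dict.mk c).getD "to" [])).contains "wikipedia") = (pvGetWiki c).isSome := by
  simp [pvGetWiki, PySem.Dict.contains_eq_isSome_get?]

lemma pvLoopA_no_target (lst : List (List (String × List (String × String)))) (d : Option String)
    (h : lst.filterMap pvGetWiki = []) : pvLoopA lst d = .ok d := by
  induction lst generalizing d with
  | nil => rfl
  | cons c rest ih =>
    simp only [List.filterMap_cons] at h
    cases hw : pvGetWiki c with
    | some w => simp [hw] at h
    | none => simp only [hw] at h; simp [pvLoopA, hw, ih d h]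

lemma pvLoopA_one_target (lst : List (List (String × List (String × String)))) (t : String)
    (h : lst.filterMap pvGetWiki = [t]) : pvLoopA lst none = .ok (some t) := by
  induction lst with
  | nil => simp at h
  | cons c rest ih =>
    simp only [List.filterMap_cons] at h
    cases hw : pvGetWiki c with
    | some w =>
      simp only [hw] at h
      obtain ⟨heq, hrest⟩ := List.cons_eq_cons.mp h
      subst heq
      simp [pvLoopA, hw, pvLoopA_no_target rest (some w) hrest]
    | none => simp only [hw] at h; simp [pvLoopA, hw, ih h]

lemma pvSingle_no_target (lst : List (List (String × List (String × String))))
    (h : lst.filterMap pvGetWiki = []) : pvSingleTarget lst = none := by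
  induction lst with
  | nil => rfl
  | cons c rest ih =>
    simp only [List.filterMap_cons] at h
    cases hw : pvGetWiki c with
    | some w => simp [hw] at h
    | none =>
      simp only [hw] at h
      simp [pvSingleTarget, show PySem.Dict.get? (PySem.Dict.mk ((PySem.Dict.mk c).getD "to" [])) "wikipedia" = none from hw, ih h]

lemma pvSingle_one_target (lst : List (List (String × List (String × String)))) (t : String)
    (h : lst.filterMap pvGetWiki = [t]) : pvSingleTarget lst = some t := by
  induction lst with
  | nil => simp at h
  | cons c rest ih =>
    simp only [List.filterMap_cons] at h
    cases hw : pvGetWiki c with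
    | some w =>
      simp only [hw] at h
      obtain ⟨heq, hrest⟩ := List.cons_eq_cons.mp h
      subst heq
      simp only [pvSingleTarget]
      rw [show PySem.Dict.get? (PySem.Dict.mk ((PySem.Dict.mk c).getD "to" [])) "wikipedia" = pvGetWiki c from rfl, hw,
        pvSingle_no_target rest hrest]
      simp
    | none =>
      simp only [hw] at h
      simp [pvSingleTarget, show PySem.Dict.get? (PySem.Dict.mk ((PySem.Dict.mk c).getD "to" [])) "wikipedia" = none from hw, ih h]

lemma pvLen_filterMap (lst : List (List (String × List (String × String)))) :
    (lst.filterMap pvGetWiki).length = lst.countP (fun c => (pvGetWiki c).isSome) := by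
  induction lst with
  | nil => rfl
  | cons c rest ih =>
    cases hw : pvGetWiki c <;> simp [hw, ih]

-- ===== VERDICT (by name: the statement is the Claim_ definition above) =====
theorem desired_wikipedia_target_spec : Claim_equal_desired_wikipedia_target := by
  intro e _ hpre
  unfold Spec_desired_wikipedia_target desired_wikipedia_target desired_wikipedia_target_alt
  unfold Pre_desired_wikipedia_target at hpre
  cases hget : PySem.Dict.get? (PySem.Dict.mk e) "proposed_tagging_changes" with
  | none => simp [hget] at hpre
  | some o =>
    cases o with
    | none => simp [pvSingleTarget]
    | some lst =>
      rw [hget] at hpre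
      obtain ⟨-, -, hcount⟩ := hpre
      simp only [Option.getD_some, pvContains_eq] at hcount
      rw [← pvLen_filterMap] at hcount
      match htg : lst.filterMap pvGetWiki with
      | [] => simp [pvLoopA_no_target lst none htg, pvSingle_no_target lst htg]
      | [t] => simp [pvLoopA_one_target lst t htg, pvSingle_one_target lst t htg]
      | t :: u :: rest => rw [htg] at hcount; simp at hcount
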